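-- pv_equiv track=rewrite | github.com/ds501/Troptimal | troptimal_app/views.py | define_value_matrix
-- ===== SOURCE A (Python) =====
-- def define_value_matrix(num_periods, num_attract):
--     values = list()
--     for i in range(num_periods):
--         values.append([])
--     for item in values:
--         for j in range(num_attract):
--             item.append([])
--     for item1 in values:
--         for item2 in item1:
--             for j in range(num_attract):
--                 item2.append([])
--     return values
-- ===== SOURCE B (Python) =====
-- def define_value_matrix(num_periods, num_attract):
--     p = max(num_periods, 0)
--     a = max(num_attract, 0)
--     flat = [[] for _ in range(p * a * a)]
--     rows = [flat[k * a:(k + 1) * a] for k in range(p * a)]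
--     return [rows[k * a:(k + 1) * a] for k in range(p)]
-- ===== Notes on version B (the rewrite author's own statement) =====
-- stated objective: alternative
-- what changed: A grows the nesting level by level in three sequential mutating passes (append a [] per period, then per row, then per cell); B allocates all p*a*a leaf lists in one flat pool and reshapes it into the 3D structure by slicing it into rows of length a and the rows into blocks of length a.
import Mathlib
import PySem

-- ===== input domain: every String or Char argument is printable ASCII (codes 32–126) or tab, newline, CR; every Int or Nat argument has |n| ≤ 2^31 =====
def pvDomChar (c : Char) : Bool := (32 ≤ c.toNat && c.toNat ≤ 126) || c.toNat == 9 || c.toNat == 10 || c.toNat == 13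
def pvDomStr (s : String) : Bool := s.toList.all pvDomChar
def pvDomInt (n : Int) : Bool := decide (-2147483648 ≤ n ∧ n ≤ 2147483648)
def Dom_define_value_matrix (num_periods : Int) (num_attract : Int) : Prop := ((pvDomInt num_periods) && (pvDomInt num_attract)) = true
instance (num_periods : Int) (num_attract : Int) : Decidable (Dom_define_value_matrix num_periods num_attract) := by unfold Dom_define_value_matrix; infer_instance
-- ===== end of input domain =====

-- B allocates the p*a*a leaf lists as one flat pool and reshapes it by slicing into rows
-- and blocks, instead of A's three level-by-level append passes (objective: alternative).

-- ===== PORT A =====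
-- pass 1: values.append([]) per period; pass 2: each item gains num_attract [];
-- pass 3: each inner item gains num_attract [].  In-place mutation of each element
-- is rendered as a map applying that element's append loop.
def define_value_matrix (num_periods : Int) (num_attract : Int) : List (List (List (List Int))) :=
  let values : List (List (List (List Int))) :=
    (PySem.List.pyRange 0 num_periods 1).foldl (fun acc _ => acc ++ [[]]) []
  let values2 := values.map (fun item =>
    (PySem.List.pyRange 0 num_attract 1).foldl (fun it _ => it ++ [[]]) item)
  let values3 := values2.map (fun item1 => item1.map (fun item2 =>
    (PySem.List.pyRange 0 num_attract 1).foldl (fun it _ => it ++ [[]]) item2))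
  values3

-- ===== PORT B =====
-- flat pool of p*a*a empty lists, sliced into rows of length a, then rows into blocks of length a
def define_value_matrix_alt (num_periods : Int) (num_attract : Int) : List (List (List (List Int))) :=
  let p := max num_periods 0
  let a := max num_attract 0
  let flat : List (List Int) := (PySem.List.pyRange 0 (p*a*a) 1).map (fun _ => ([] : List Int))
  let rows : List (List (List Int)) := (PySem.List.pyRange 0 (p*a) 1).map (fun k =>
    PySem.List.slice flat (some (k*a)) (some ((k+1)*a)))
  (PySem.List.pyRange 0 p 1).map (fun k =>
    PySem.List.slice rows (some (k*a)) (some ((k+1)*a)))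

-- ===== PRECONDITION & SPEC =====
def Spec_define_value_matrix (num_periods : Int) (num_attract : Int) (out : List (List (List (List Int)))) : Prop := out = define_value_matrix_alt num_periods num_attract
instance (num_periods : Int) (num_attract : Int) (out : List (List (List (List Int)))) : Decidable (Spec_define_value_matrix num_periods num_attract out) := by unfold Spec_define_value_matrix; infer_instance

-- ===== CLAIM (what is proved, stated in full; the proofs are below) =====
def Claim_equal_define_value_matrix : Prop := ∀ (num_periods : Int) (num_attract : Int), Dom_define_value_matrix num_periods num_attract → Spec_define_value_matrix num_periods num_attract (define_value_matrix num_periods num_attract)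

-- ===== LEMMAS AND PROOFS =====

-- a range-map of a constant is a replicate
theorem pv_pyRange_map_const {α : Type} (n : Int) (x : α) :
    (PySem.List.pyRange 0 n 1).map (fun _ => x) = List.replicate n.toNat x := by
  simp [PySem.List.pyRange_one, List.map_map, Function.comp_def, List.map_const']

-- slicing a block of length n out of a replicate pool yields a replicate of length n
theorem pv_slice_rep {α : Type} (m k n : Nat) (x : α) (h : k*n + n ≤ m) :
    PySem.List.slice (List.replicate m x) (some ((k*n : Nat) : Int)) (some (((k*n + n : Nat) : Int))) = List.replicate n x := by
  rw [PySem.List.slice_natCast]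
  simp [List.drop_replicate, List.take_replicate]
  omega

-- slicing a replicate pool of ≥ P*A elements into P chunks of A gives a replicate of replicates
theorem pv_pyRange_map_slice_rep {α : Type} (P A M : Nat) (x : α) (h : P*A ≤ M) :
    (PySem.List.pyRange 0 ((P:Nat):Int) 1).map (fun k =>
        PySem.List.slice (List.replicate M x) (some (k*(A:Int))) (some ((k+1)*(A:Int))))
      = List.replicate P (List.replicate A x) := by
  rw [PySem.List.pyRange_one]
  simp only [Int.sub_zero, Int.toNat_natCast, List.map_map]
  rw [List.map_congr_left (g := fun _ => List.replicate A x)]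
  · simp [List.map_const']
  · intro k hk
    simp only [List.mem_range] at hk
    show PySem.List.slice _ (some (((0:Int) + (k:Int))*(A:Int))) (some (((0:Int) + (k:Int)+1)*(A:Int))) = _
    have e2 : ((0:Int) + k)*(A:Int) = ((k*A : Nat) : Int) := by push_cast; ring
    have e3 : ((0:Int) + (k:Int) + 1)*(A:Int) = ((k*A + A : Nat) : Int) := by push_cast; ring
    rw [e2, e3, pv_slice_rep]
    calc k*A + A = (k+1)*A := by ring
      _ ≤ P*A := Nat.mul_le_mul_right _ hk
      _ ≤ M := h

-- A's three passes produce the canonical replicate-of-replicates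
theorem pv_A_eq_rep (p a : Int) :
    define_value_matrix p a = List.replicate p.toNat (List.replicate a.toNat (List.replicate a.toNat ([] : List Int))) := by
  unfold define_value_matrix
  simp [List.map_replicate]  -- the default pysem simp set rewrites the append folds and ranges

-- B's flat pool + reshape produces the same canonical form
theorem pv_B_eq_rep (p a : Int) :
    define_value_matrix_alt p a = List.replicate p.toNat (List.replicate a.toNat (List.replicate a.toNat ([] : List Int))) := by
  unfold define_value_matrix_alt
  have hp : max p 0 = ((p.toNat : Nat) : Int) := by omega
  have ha : max a 0 = ((a.toNat : Nat) : Int) := by omega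
  rw [hp, ha]
  dsimp only
  set P := p.toNat
  set A := a.toNat
  have h1 : ((P:Int)*A*A) = ((P*A*A : Nat) : Int) := by push_cast; ring
  have h2 : ((P:Int)*A) = ((P*A : Nat) : Int) := by push_cast; ring
  rw [h1, h2, pv_pyRange_map_const, Int.toNat_natCast]
  rw [pv_pyRange_map_slice_rep (P*A) A (P*A*A) ([] : List Int) (by rw [Nat.mul_assoc])]
  rw [pv_pyRange_map_slice_rep P A (P*A) (List.replicate A ([] : List Int)) (le_refl _)]

-- ===== VERDICT (by name: the statement is the Claim_ definition above) =====
theorem define_value_matrix_spec : Claim_equal_define_value_matrix := by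
  intro p a _
  show _ = _
  rw [pv_A_eq_rep, pv_B_eq_rep]
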